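-- pv_equiv track=rewrite | github.com/jongwoo108/EyeSis | src/utils/face_angle_detector.py | is_all_angles_collected
-- ===== SOURCE A (Python) =====
-- def is_all_angles_collected(collected_angles: list[str]) -> bool:
--     """
--     모든 필수 각도가 수집되었는지 확인
--
--     필수 각도 (정답 데이터 기준):
--     - front: 최소 1개
--     - left: 최소 1개
--     - right: 최소 1개
--     - top: 최소 1개
--
--     Args:
--         collected_angles: 이미 수집된 각도 리스트
--
--     Returns:
--         True면 모든 필수 각도 수집 완료
--     """
--     from collections import defaultdict
--
--     required_angles = {
--         "front": 1,  # 최소 1개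
--         "left": 1,   # 최소 1개
--         "right": 1,  # 최소 1개
--         "top": 1     # 최소 1개
--     }
--
--     angle_counts = defaultdict(int)
--     for angle in collected_angles:
--         angle_counts[angle] += 1
--
--     # 필수 각도 모두 수집되었는지 확인
--     for angle, min_count in required_angles.items():
--         if angle_counts[angle] < min_count:
--             return False
--
--     return True
-- ===== SOURCE B (Python) =====
-- def is_all_angles_collected(collected_angles: list[str]) -> bool:
--     remaining = {"front", "left", "right", "top"}
--     for angle in collected_angles:
--         remaining.discard(angle)
--         if not remaining:
--             return True
--     return False
-- ===== Notes on version B (the rewrite author's own statement) =====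
-- stated objective: alternative
-- what changed: Instead of building a defaultdict count table over the whole input and then looping over the required angles, B makes a single pass over the input maintaining the set of still-missing required angles, discarding each seen angle and returning True as soon as the set becomes empty (short-circuiting), False if the pass ends with angles still missing.
import Mathlib
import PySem

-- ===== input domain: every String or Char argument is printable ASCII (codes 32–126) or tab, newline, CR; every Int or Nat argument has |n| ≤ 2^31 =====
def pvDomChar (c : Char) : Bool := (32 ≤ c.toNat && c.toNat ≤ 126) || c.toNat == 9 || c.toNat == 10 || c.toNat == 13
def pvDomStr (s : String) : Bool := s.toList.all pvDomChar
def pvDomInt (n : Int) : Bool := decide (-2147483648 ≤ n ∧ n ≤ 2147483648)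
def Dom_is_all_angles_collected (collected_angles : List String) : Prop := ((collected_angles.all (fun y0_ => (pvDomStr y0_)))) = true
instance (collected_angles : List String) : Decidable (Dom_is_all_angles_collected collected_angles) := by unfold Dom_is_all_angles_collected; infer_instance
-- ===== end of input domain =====

-- B replaces A's count-table-then-check with a single short-circuiting pass over the input
-- that whittles down a set of still-missing required angles (alternative; same return value everywhere).

-- ===== PORT A =====
-- port of A's second loop: for angle, min_count in required_angles.items(): if angle_counts[angle] < min_count: return False
def pvCheckRequired (required : List (String × Int)) (counts : PySem.Dict String Int) : Bool :=
  match required with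
  | [] => true
  | (angle, min_count) :: rest =>
      if counts.getD angle 0 < min_count then false else pvCheckRequired rest counts

def is_all_angles_collected (collected_angles : List String) : Bool :=
  let required_angles : List (String × Int) := [("front", 1), ("left", 1), ("right", 1), ("top", 1)]
  let angle_counts := collected_angles.foldl (fun d x => d.modify x 0 (· + 1)) PySem.Dict.empty
  pvCheckRequired required_angles angle_counts

-- ===== PORT B =====
-- port of B's loop: for angle in collected_angles: remaining.discard(angle); if not remaining: return True
def pvRemainLoop (remaining : PySem.Set String) (xs : List String) : Bool :=
  match xs with
  | [] => false
  | angle :: rest =>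
      let remaining' := PySem.Set.discard remaining angle
      if remaining'.isEmpty then true else pvRemainLoop remaining' rest

def is_all_angles_collected_alt (collected_angles : List String) : Bool :=
  pvRemainLoop (PySem.Set.ofList ["front", "left", "right", "top"]) collected_angles

-- ===== PRECONDITION & SPEC =====
def Spec_is_all_angles_collected (collected_angles : List String) (out : Bool) : Prop := out = is_all_angles_collected_alt collected_angles
instance (collected_angles : List String) (out : Bool) : Decidable (Spec_is_all_angles_collected collected_angles out) := by unfold Spec_is_all_angles_collected; infer_instance

-- ===== CLAIM (what is proved, stated in full; the proofs are below) =====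
def Claim_equal_is_all_angles_collected : Prop := ∀ (collected_angles : List String), Dom_is_all_angles_collected collected_angles → Spec_is_all_angles_collected collected_angles (is_all_angles_collected collected_angles)

-- ===== LEMMAS AND PROOFS =====

-- B's loop returns true iff every still-missing angle occurs in the rest of the input.
theorem pvRemainLoop_true_iff (xs : List String) : ∀ (r : List String), r ≠ [] →
    (pvRemainLoop r xs = true ↔ ∀ a ∈ r, a ∈ xs) := by
  induction xs with
  | nil =>
      intro r hr
      simp only [pvRemainLoop]
      constructor
      · intro h; exact absurd h (by simp)
      · intro h
        obtain ⟨a, ha⟩ := List.exists_mem_of_ne_nil r hr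
        exact absurd (h a ha) (by simp)
  | cons x rest ih =>
      intro r hr
      simp only [pvRemainLoop]
      by_cases hemp : (PySem.Set.discard r x).isEmpty = true
      · simp only [hemp, if_true, true_iff]
        intro a ha
        rw [List.isEmpty_iff] at hemp
        have : a ∈ PySem.Set.discard r x ∨ a = x := by
          by_cases hax : a = x
          · exact Or.inr hax
          · exact Or.inl ((PySem.Set.mem_discard _ _ _).mpr ⟨ha, hax⟩)
        rcases this with h | h
        · rw [hemp] at h; exact absurd h (by simp)
        · simp [h]
      · simp only [hemp, Bool.false_eq_true, if_false]
        have hne : PySem.Set.discard r x ≠ [] := by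
          intro h; rw [← List.isEmpty_iff] at h; exact hemp h
        rw [ih _ hne]
        constructor
        · intro h a ha
          by_cases hax : a = x
          · simp [hax]
          · exact List.mem_cons_of_mem _ (h a ((PySem.Set.mem_discard _ _ _).mpr ⟨ha, hax⟩))
        · intro h a ha
          obtain ⟨har, hax⟩ := (PySem.Set.mem_discard _ _ _).mp ha
          rcases List.mem_cons.mp (h a har) with h' | h'
          · exact absurd h' hax
          · exact h'

theorem alt_true_iff (xs : List String) : is_all_angles_collected_alt xs = true ↔
    ("front" ∈ xs ∧ "left" ∈ xs ∧ "right" ∈ xs ∧ "top" ∈ xs) := by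
  unfold is_all_angles_collected_alt
  have hof : PySem.Set.ofList ["front", "left", "right", "top"] = ["front", "left", "right", "top"] := by decide
  rw [hof, pvRemainLoop_true_iff xs _ (by simp)]
  simp

-- ===== VERDICT (by name: the statement is the Claim_ definition above) =====
theorem is_all_angles_collected_spec : Claim_equal_is_all_angles_collected := by
  intro xs _
  unfold Spec_is_all_angles_collected
  rw [Bool.eq_iff_iff, alt_true_iff]
  unfold is_all_angles_collected
  simp only [pvCheckRequired, PySem.Dict.getD_foldl_modify_add_one]
  have h : ∀ a : String, ((0 : Int) + xs.count a < 1) ↔ ¬ a ∈ xs := by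
    intro a; simp [← List.count_pos_iff]
  by_cases hf : "front" ∈ xs <;>
  by_cases hl : "left" ∈ xs <;>
  by_cases hr : "right" ∈ xs <;>
  by_cases ht : "top" ∈ xs <;>
  simp_all
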